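-- pv_equiv track=rewrite | github.com/HYUNSIK-JI/Algorithm | 프로그래머스/unrated/155652. 둘만의 암호/둘만의 암호.py | solution
-- ===== SOURCE A (Python) =====
-- def solution(s, skip, index):
--     skip_list = set(ord(i) for i in skip)
--     ans = []
--
--     for word in s:
--         cnt = index
--         k = ord(word)
--
--         while cnt:
--             k += 1
--
--             if k > 122:
--                 k -= 26
--             if k in skip_list:
--                 continue
--             cnt -= 1
--         ans.append(chr(k))
--     return "".join(ans)
-- ===== SOURCE B (Python) =====
-- def solution(s, skip, index):
--     # Faster: instead of stepping `index` times per character, compute the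
--     # target directly: scan the one-off run up to 'z', then use modular
--     # arithmetic on the precomputed allowed-letter cycle.
--     skip_set = {ord(c) for c in skip}
--     allowed = [k for k in range(97, 123) if k not in skip_set]
--     out = []
--     for ch in s:
--         start = ord(ch)
--         if index == 0:
--             out.append(ch)
--             continue
--         p0 = start + 1
--         if p0 > 122:
--             p0 -= 26
--         prefix = [p for p in range(p0, 123) if p not in skip_set]
--         i = index - 1
--         if i < len(prefix):
--             out.append(chr(prefix[i]))
--         else:
--             r = i - len(prefix)
--             out.append(chr(allowed[r % len(allowed)]))
--     return "".join(out)
-- ===== Notes on version B (the rewrite author's own statement) =====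
-- stated objective: faster
-- what changed: Per character, B replaces A's step-by-step walk (index iterations of +1 with wrap and skip test) by direct indexing: one scan of the run up to 'z' plus modular arithmetic on the precomputed allowed-letter cycle.
import Mathlib
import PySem

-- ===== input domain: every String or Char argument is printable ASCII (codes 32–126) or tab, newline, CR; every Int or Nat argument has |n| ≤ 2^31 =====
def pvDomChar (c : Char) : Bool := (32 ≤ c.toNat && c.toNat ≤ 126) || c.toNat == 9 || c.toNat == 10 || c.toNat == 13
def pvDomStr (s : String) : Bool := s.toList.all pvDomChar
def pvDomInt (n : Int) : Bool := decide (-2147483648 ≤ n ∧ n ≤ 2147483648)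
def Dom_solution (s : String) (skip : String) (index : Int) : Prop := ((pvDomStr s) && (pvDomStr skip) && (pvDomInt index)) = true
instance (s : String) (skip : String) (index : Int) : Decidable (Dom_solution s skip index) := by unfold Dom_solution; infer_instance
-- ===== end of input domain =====

-- B re-implements the per-character walk by direct indexing: a one-off scan of the
-- run up to 'z' plus modular arithmetic on the precomputed allowed-letter cycle,
-- instead of stepping `index` times per character (asymptotically faster in `index`).

-- ===== PORT A =====
-- fuel makes A's `while cnt:` total; under Pre_solution the fuel is never exhausted
def solutionLoop (S : PySem.Set Int) : Nat → Int → Int → Int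
  | 0, k, _ => k
  | fuel+1, k, cnt =>
    if cnt ≠ 0 then
      let k1 := k + 1
      let k2 := if k1 > 122 then k1 - 26 else k1
      if S.contains k2 then solutionLoop S fuel k2 cnt
      else solutionLoop S fuel k2 (cnt - 1)
    else k

def solution (s : String) (skip : String) (index : Int) : String :=
  let skipList : PySem.Set Int := PySem.Set.ofList (skip.toList.map (fun c => (c.toNat : Int)))
  let ans : List Char := s.toList.foldl (fun acc word =>
      let k := solutionLoop skipList (index.toNat * 26 + 120) ((word.toNat : Int)) index
      acc ++ [Char.ofNat k.toNat]) []
  String.ofList ans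

-- ===== PORT B =====
def solution_alt (s : String) (skip : String) (index : Int) : String :=
  let skipSet : PySem.Set Int := PySem.Set.ofList (skip.toList.map (fun c => (c.toNat : Int)))
  let allowed : List Int := (PySem.List.pyRange 97 123 1).filter (fun k => !(skipSet.contains k))
  let out : List Char := s.toList.foldl (fun acc ch =>
      if index = 0 then acc ++ [ch]
      else
        let p0 := (ch.toNat : Int) + 1
        let p0 := if p0 > 122 then p0 - 26 else p0
        let pre := (PySem.List.pyRange p0 123 1).filter (fun p => !(skipSet.contains p))
        let i := index - 1
        if i < (pre.length : Int) then
          acc ++ [Char.ofNat (PySem.List.pyGetD pre i 0).toNat]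
        else
          let r := i - (pre.length : Int)
          acc ++ [Char.ofNat (PySem.List.pyGetD allowed (PySem.Int.mod r (allowed.length : Int)) 0).toNat]) []
  String.ofList out

-- ===== PRECONDITION & SPEC =====
-- Pre_solution excludes exactly the inputs on which A never returns (the while
-- loop diverges): with a nonempty s, a negative index, or a positive index that
-- must enter the letter cycle while every letter a–z is in skip.  No input on
-- which A returns a value is excluded (for empty s, A returns "" regardless).
def Pre_solution (s : String) (skip : String) (index : Int) : Prop :=
  s.toList = [] ∨
  (0 ≤ index ∧
  (index = 0 ∨
    (∃ k ∈ PySem.List.pyRange 97 123 1,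
        (PySem.Set.ofList (skip.toList.map (fun c => (c.toNat : Int)))).contains k = false) ∨
    (∀ c ∈ s.toList,
        index ≤ (((PySem.List.pyRange
            (if (c.toNat : Int) + 1 > 122 then (c.toNat : Int) + 1 - 26 else (c.toNat : Int) + 1) 123 1).filter
            (fun p => !((PySem.Set.ofList (skip.toList.map (fun c => (c.toNat : Int)))).contains p))).length : Int))))
instance (s : String) (skip : String) (index : Int) : Decidable (Pre_solution s skip index) := by
  unfold Pre_solution; infer_instance

def pvWitness_solution : String × String × Int := ("aib", "cd", 3)

def Spec_solution (s : String) (skip : String) (index : Int) (out : String) : Prop := out = solution_alt s skip index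
instance (s : String) (skip : String) (index : Int) (out : String) : Decidable (Spec_solution s skip index out) := by unfold Spec_solution; infer_instance

-- ===== CLAIM (what is proved, stated in full; the proofs are below) =====
def Claim_equal_solution : Prop := ∀ (s : String) (skip : String) (index : Int), Dom_solution s skip index → Pre_solution s skip index → Spec_solution s skip index (solution s skip index)

-- ===== LEMMAS AND PROOFS =====

def nx (k : Int) : Int := if k + 1 > 122 then k + 1 - 26 else k + 1
def ivs : Int → Nat → List Int
  | _, 0 => []
  | k, n+1 => nx k :: ivs (nx k) n
def itn : Int → Nat → Int
  | k, 0 => k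
  | k, n+1 => itn (nx k) n

theorem ivs_add : ∀ (m n : Nat) (k : Int), ivs k (m + n) = ivs k m ++ ivs (itn k m) n ∧ itn k (m + n) = itn (itn k m) n := by
  intro m
  induction m with
  | zero => intro n k; simp [ivs, itn]
  | succ m ih =>
    intro n k
    have h : m + 1 + n = (m + n) + 1 := by omega
    rw [h]
    simpa [ivs, itn, Nat.succ_add] using ih n (nx k)

theorem ivs_run : ∀ (n : Nat) (a : Int), a + n ≤ 122 →
    ivs a n = PySem.List.pyRange (a + 1) (a + 1 + n) 1 ∧ itn a n = a + n := by
  intro n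
  induction n with
  | zero => intro a h; simp [ivs, itn, PySem.List.pyRange_one_eq_nil]
  | succ n ih =>
    intro a h
    have hle : a + 1 + n ≤ 122 := by push_cast at h ⊢; omega
    have hnx : nx a = a + 1 := by unfold nx; split <;> [omega; rfl] -- a+1 ≤ 122
    obtain ⟨h1, h2⟩ := ih (a + 1) hle
    constructor
    · rw [show ivs a (n+1) = nx a :: ivs (nx a) n from rfl, hnx, h1,
        ← PySem.List.pyRange_one_cons (by push_cast at h ⊢; omega)]
      congr 1
      push_cast; ring
    · rw [show itn a (n+1) = itn (nx a) n from rfl, hnx, h2]; push_cast; ring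

set_option maxRecDepth 10000 in
theorem ivs_cycle : ivs 122 26 = PySem.List.pyRange 97 123 1 ∧ itn 122 26 = 122 :=
  ⟨by decide, by decide⟩

theorem ivs_cycles : ∀ (q : Nat),
    ivs 122 (26 * q) = (List.replicate q (PySem.List.pyRange 97 123 1)).flatten ∧ itn 122 (26 * q) = 122 := by
  intro q
  induction q with
  | zero => simp [ivs, itn]
  | succ q ih =>
    have h : 26 * (q + 1) = 26 + 26 * q := by ring
    rw [h]
    obtain ⟨ha, hb⟩ := ivs_add 26 (26 * q) 122
    rw [ha, hb, ivs_cycle.2, ivs_cycle.1, ih.1, ih.2]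
    simp [List.replicate_succ]

theorem flatten_replicate_length {α : Type} (q : Nat) (L : List α) :
    ((List.replicate q L).flatten).length = q * L.length := by
  induction q with
  | zero => simp
  | succ q ih => simp [List.replicate_succ, ih]; ring

theorem filter_flatten_replicate {α : Type} (P : α → Bool) (q : Nat) (L : List α) :
    ((List.replicate q L).flatten).filter P = (List.replicate q (L.filter P)).flatten := by
  induction q with
  | zero => simp
  | succ q ih => simp [List.replicate_succ, List.filter_append, ih]

theorem flatten_replicate_getElem? {α : Type} : ∀ (q : Nat) (L : List α) (i : Nat), i < q * L.length →
    ((List.replicate q L).flatten)[i]? = L[i % L.length]? := by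
  intro q
  induction q with
  | zero => intro L i h; omega
  | succ q ih =>
    intro L i h
    rw [List.replicate_succ, List.flatten_cons]
    by_cases hi : i < L.length
    · rw [List.getElem?_append_left hi, Nat.mod_eq_of_lt hi]
    · have hi' : L.length ≤ i := Nat.le_of_not_lt hi
      rw [List.getElem?_append_right hi', Nat.mod_eq_sub_mod hi']
      exact ih L (i - L.length) (by have hs : (q+1) * L.length = q * L.length + L.length := Nat.succ_mul q L.length; omega)

theorem solutionLoop_zero (S : PySem.Set Int) (f : Nat) (k : Int) :
    solutionLoop S f k 0 = k := by
  cases f <;> simp [solutionLoop]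

theorem solutionLoop_filter (S : PySem.Set Int) :
    ∀ (f : Nat) (k : Int) (n : Nat) (x : Int),
      ((ivs k f).filter (fun y => !(S.contains y)))[n]? = some x →
      solutionLoop S f k ((n : Int) + 1) = x := by
  intro f
  induction f with
  | zero => intro k n x h; simp [ivs] at h
  | succ f ih =>
    intro k n x h
    rw [show ivs k (f+1) = nx k :: ivs (nx k) f from rfl] at h
    have hne : ((n : Int) + 1) ≠ 0 := by omega
    rw [show solutionLoop S (f+1) k ((n : Int) + 1) =
        (if ((n : Int) + 1) ≠ 0 then
          (if S.contains (if k + 1 > 122 then k + 1 - 26 else k + 1)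
            then solutionLoop S f (if k + 1 > 122 then k + 1 - 26 else k + 1) ((n : Int) + 1)
            else solutionLoop S f (if k + 1 > 122 then k + 1 - 26 else k + 1) ((n : Int) + 1 - 1))
          else k) from rfl, if_pos hne]
    have hnx : (if k + 1 > 122 then k + 1 - 26 else k + 1) = nx k := rfl
    rw [hnx]
    by_cases hc : S.contains (nx k)
    · rw [if_pos hc]
      rw [List.filter_cons, if_neg (by rw [hc]; decide)] at h
      exact ih (nx k) n x h
    · rw [if_neg hc]
      have hc' : S.contains (nx k) = false := by simpa using hc
      rw [List.filter_cons, if_pos (by rw [hc']; decide)] at h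
      cases n with
      | zero =>
        simp at h
        subst h
        norm_num
        exact solutionLoop_zero S f (nx k)
      | succ m =>
        rw [List.getElem?_cons_succ] at h
        have := ih (nx k) m x h
        have harith : ((m + 1 : Nat) : Int) + 1 - 1 = ((m : Int) + 1) := by push_cast; ring
        rw [harith]
        exact this

theorem ivs_prefix (start : Int) (h1 : 9 ≤ start) (h2 : start ≤ 126) :
    ivs start (123 - (if start + 1 > 122 then start + 1 - 26 else start + 1)).toNat
      = PySem.List.pyRange (if start + 1 > 122 then start + 1 - 26 else start + 1) 123 1 ∧
    itn start (123 - (if start + 1 > 122 then start + 1 - 26 else start + 1)).toNat = 122 := by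
  by_cases hw : start + 1 > 122
  · rw [if_pos hw]
    -- p0 = start - 25 ∈ [98, 101]; first step wraps, then a straight run
    have hp0 : 97 ≤ start + 1 - 26 ∧ start + 1 - 26 ≤ 101 := by omega
    have hs : (123 - (start + 1 - 26)).toNat = (122 - (start + 1 - 26)).toNat + 1 := by omega
    rw [hs]
    have hnx : nx start = start + 1 - 26 := by unfold nx; rw [if_pos hw]
    obtain ⟨ha, hb⟩ := ivs_run (122 - (start + 1 - 26)).toNat (start + 1 - 26) (by omega)
    constructor
    · rw [show ivs start ((122 - (start + 1 - 26)).toNat + 1) = nx start :: ivs (nx start) (122 - (start + 1 - 26)).toNat from rfl,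
        hnx, ha, ← PySem.List.pyRange_one_cons (by omega)]
      congr 1
      omega
    · rw [show itn start ((122 - (start + 1 - 26)).toNat + 1) = itn (nx start) (122 - (start + 1 - 26)).toNat from rfl, hnx, hb]
      omega
  · rw [if_neg hw]
    have hle : start + 1 ≤ 122 := by omega
    have hs : (123 - (start + 1)).toNat = (122 - start).toNat := by omega
    obtain ⟨ha, hb⟩ := ivs_run (122 - start).toNat start (by omega)
    rw [hs]
    constructor
    · rw [ha]; congr 1; omega
    · rw [hb]; omega
theorem char_prefix (S : PySem.Set Int) (start index : Int) (h1 : 9 ≤ start) (h2 : start ≤ 126) (hi : 1 ≤ index)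
    (hlt : index - 1 < ((((PySem.List.pyRange (if start + 1 > 122 then start + 1 - 26 else start + 1) 123 1).filter (fun p => !(S.contains p))).length : Int))) :
    solutionLoop S (index.toNat * 26 + 120) start index
      = PySem.List.pyGetD ((PySem.List.pyRange (if start + 1 > 122 then start + 1 - 26 else start + 1) 123 1).filter (fun p => !(S.contains p))) (index - 1) 0 := by
  set p0 := if start + 1 > 122 then start + 1 - 26 else start + 1 with hp0def
  set pre := (PySem.List.pyRange p0 123 1).filter (fun p => !(S.contains p)) with hpredef
  have hp0 : 10 ≤ p0 ∧ p0 ≤ 122 := by rw [hp0def]; split <;> omega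
  set Ls := (123 - p0).toNat with hLs
  have hLs2 : Ls ≤ 113 := by omega
  set fuel := index.toNat * 26 + 120 with hfuel
  set m := fuel - Ls with hm
  have hsplit : fuel = Ls + m := by omega
  obtain ⟨hpref, hend⟩ := ivs_prefix start h1 h2
  rw [← hp0def, ← hLs] at hpref hend
  set n := (index - 1).toNat with hn
  have hnc : (n : Int) = index - 1 := by omega
  have hnlt : n < pre.length := by omega
  have hivs : ivs start fuel = PySem.List.pyRange p0 123 1 ++ ivs 122 m := by
    rw [hsplit, (ivs_add Ls m start).1, hend, hpref]
  have hget : ((ivs start fuel).filter (fun y => !(S.contains y)))[n]? = some pre[n] := by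
    rw [hivs, List.filter_append, List.getElem?_append_left (by exact hnlt), List.getElem?_eq_getElem hnlt]
  have := solutionLoop_filter S fuel start n pre[n] hget
  rw [show (n : Int) + 1 = index by omega] at this
  rw [this, ← hnc, PySem.List.pyGetD_natCast, List.getD_eq_getElem _ _ hnlt]

theorem char_cycle (S : PySem.Set Int) (start index : Int) (h1 : 9 ≤ start) (h2 : start ≤ 126) (hi : 1 ≤ index)
    (hge : ((((PySem.List.pyRange (if start + 1 > 122 then start + 1 - 26 else start + 1) 123 1).filter (fun p => !(S.contains p))).length : Int)) ≤ index - 1)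
    (hall : 0 < ((PySem.List.pyRange 97 123 1).filter (fun k => !(S.contains k))).length) :
    solutionLoop S (index.toNat * 26 + 120) start index
      = PySem.List.pyGetD ((PySem.List.pyRange 97 123 1).filter (fun k => !(S.contains k)))
          (PySem.Int.mod (index - 1 - ((((PySem.List.pyRange (if start + 1 > 122 then start + 1 - 26 else start + 1) 123 1).filter (fun p => !(S.contains p))).length : Int)))
            (((PySem.List.pyRange 97 123 1).filter (fun k => !(S.contains k))).length : Int)) 0 := by
  set p0 := if start + 1 > 122 then start + 1 - 26 else start + 1 with hp0def
  set pre := (PySem.List.pyRange p0 123 1).filter (fun p => !(S.contains p)) with hpredef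
  set alw := (PySem.List.pyRange 97 123 1).filter (fun k => !(S.contains k)) with halwdef
  have hp0 : 10 ≤ p0 ∧ p0 ≤ 122 := by rw [hp0def]; split <;> omega
  set Ls := (123 - p0).toNat with hLs
  have hLs2 : Ls ≤ 113 := by omega
  set fuel := index.toNat * 26 + 120 with hfuel
  set n := (index - 1).toNat with hn
  have hnc : (n : Int) = index - 1 := by omega
  set r := n - pre.length with hr
  have hrn : pre.length ≤ n := by omega
  set q := r / alw.length + 1 with hq
  have hmodlt := Nat.mod_lt r hall
  have hrq : r < q * alw.length := by
    have hdm := Nat.div_add_mod r alw.length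
    have hqm : q * alw.length = alw.length * (r / alw.length) + alw.length := by rw [hq]; ring
    omega
  have hqle : q ≤ n + 1 := by
    have := Nat.div_le_self r alw.length
    omega
  have hidx : index.toNat = n + 1 := by omega
  have hM : Ls + 26 * q ≤ fuel := by omega
  obtain ⟨hpref, hend⟩ := ivs_prefix start h1 h2
  rw [← hp0def, ← hLs] at hpref hend
  set m := fuel - (Ls + 26 * q) with hm
  have hsplit : fuel = Ls + (26 * q + m) := by omega
  have hivs : ivs start fuel
      = PySem.List.pyRange p0 123 1 ++ ((List.replicate q (PySem.List.pyRange 97 123 1)).flatten ++ ivs 122 m) := by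
    rw [hsplit, (ivs_add Ls _ start).1, hend, hpref, (ivs_add (26 * q) _ 122).1,
      (ivs_cycles q).1, (ivs_cycles q).2]
  have hget : ((ivs start fuel).filter (fun y => !(S.contains y)))[n]? = alw[r % alw.length]? := by
    rw [hivs, List.filter_append, List.filter_append, filter_flatten_replicate]
    rw [List.getElem?_append_right (by exact hrn)]
    rw [List.getElem?_append_left (by rw [flatten_replicate_length]; omega)]
    exact flatten_replicate_getElem? q alw r (by omega)
  have hgetel := hget.trans (List.getElem?_eq_getElem hmodlt)
  have := solutionLoop_filter S fuel start n _ hgetel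
  rw [show (n : Int) + 1 = index by omega] at this
  rw [this]
  have hmodarg : index - 1 - (pre.length : Int) = ((r : Nat) : Int) := by omega
  rw [hmodarg, PySem.Int.mod_natCast, PySem.List.pyGetD_natCast,
    List.getD_eq_getElem _ _ hmodlt]

theorem foldl_eq_map_of_step {α β : Type} (f : List β → α → List β) (g : α → β)
    (hf : ∀ acc x, f acc x = acc ++ [g x]) : ∀ (l : List α) (acc : List β), List.foldl f acc l = acc ++ l.map g := by
  intro l
  induction l with
  | nil => intro acc; simp
  | cons x xs ih => intro acc; rw [List.foldl_cons, hf, ih]; simp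

-- ===== VERDICT (by name: the statement is the Claim_ definition above) =====
theorem solution_spec : Claim_equal_solution := by
  intro s skip index hdom hpre
  rcases hpre with hemp | ⟨h0idx, hd⟩
  · unfold Spec_solution solution solution_alt
    simp only [hemp, List.foldl_nil]
  unfold Spec_solution solution solution_alt
  simp only [PySem.List.foldl_append_singleton_eq_map]
  set S := PySem.Set.ofList (List.map (fun c => (c.toNat : Int)) skip.toList) with hS
  rw [foldl_eq_map_of_step _
      (fun ch => if index = 0 then ch
        else
          if index - 1 < ((List.filter (fun p => !S.contains p)
                (PySem.List.pyRange (if (ch.toNat : Int) + 1 > 122 then (ch.toNat : Int) + 1 - 26 else (ch.toNat : Int) + 1) 123 1)).length : Int) then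
            Char.ofNat (PySem.List.pyGetD (List.filter (fun p => !S.contains p)
                (PySem.List.pyRange (if (ch.toNat : Int) + 1 > 122 then (ch.toNat : Int) + 1 - 26 else (ch.toNat : Int) + 1) 123 1)) (index - 1) 0).toNat
          else
            Char.ofNat (PySem.List.pyGetD (List.filter (fun p => !S.contains p) (PySem.List.pyRange 97 123 1))
                (PySem.Int.mod (index - 1 - ((List.filter (fun p => !S.contains p)
                      (PySem.List.pyRange (if (ch.toNat : Int) + 1 > 122 then (ch.toNat : Int) + 1 - 26 else (ch.toNat : Int) + 1) 123 1)).length : Int))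
                  ((List.filter (fun p => !S.contains p) (PySem.List.pyRange 97 123 1)).length : Int)) 0).toNat)
      (by intro acc x; dsimp only; split_ifs <;> rfl) s.toList []]
  simp only [List.nil_append]
  congr 1
  apply List.map_congr_left
  intro c hc
  have hds : pvDomStr s = true := by
    unfold Dom_solution at hdom
    simp only [Bool.and_eq_true] at hdom
    exact hdom.1.1
  have hdc : pvDomChar c = true := by
    unfold pvDomStr at hds
    rw [List.all_eq_true] at hds
    exact hds c hc
  have hcb : 9 ≤ (c.toNat : Int) ∧ (c.toNat : Int) ≤ 126 := by
    unfold pvDomChar at hdc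
    simp only [Bool.or_eq_true, Bool.and_eq_true, decide_eq_true_eq, beq_iff_eq] at hdc
    omega
  by_cases hz : index = 0
  · rw [if_pos hz, hz, solutionLoop_zero, Int.toNat_natCast, Char.ofNat_toNat]
  · have h1 : 1 ≤ index := by omega
    rw [if_neg hz]
    by_cases hbr : index - 1 < ((List.filter (fun p => !S.contains p)
        (PySem.List.pyRange (if (c.toNat : Int) + 1 > 122 then (c.toNat : Int) + 1 - 26 else (c.toNat : Int) + 1) 123 1)).length : Int)
    · rw [if_pos hbr, char_prefix S (c.toNat : Int) index hcb.1 hcb.2 h1 hbr]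
    · have halw : 0 < (List.filter (fun p => !S.contains p) (PySem.List.pyRange 97 123 1)).length := by
        rcases hd with h | h | h
        · exact absurd h hz
        · obtain ⟨k, hk1, hk2⟩ := h
          have hmem : k ∈ List.filter (fun p => !S.contains p) (PySem.List.pyRange 97 123 1) :=
            List.mem_filter.2 ⟨hk1, by rw [hk2]; rfl⟩
          exact List.length_pos_of_mem hmem
        · have := h c hc
          omega
      rw [if_neg hbr, char_cycle S (c.toNat : Int) index hcb.1 hcb.2 h1 (by omega) halw]
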